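-- pv_equiv track=rewrite | github.com/HaolinX/face_recogntion | face_classification.py | get_clip_times
-- ===== SOURCE A (Python) =====
-- def get_clip_times(frame_list, fps=24):
--     start_index = 0
--     clips = []
--     for i in range(1, len(frame_list)):
--         if frame_list[i] - frame_list[i - 1] > 6:
--             sub_clip = (frame_list[start_index] // fps, frame_list[i - 1] // fps + 1)
--             clips.append(sub_clip)
--             start_index = i
--         else:
--             continue
--     else:
--         sub_clip = (frame_list[start_index] // fps, frame_list[len(frame_list) - 1] // fps + 1)
--         clips.append(sub_clip)
--     return clips
-- ===== SOURCE B (Python) =====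
-- def get_clip_times(frame_list, fps=24):
--     # Boundary-index method: find the indices where each run starts, then pair
--     # consecutive boundaries into clips; no accumulator or run-building state.
--     n = len(frame_list)
--     starts = [i for i in range(n) if i == 0 or frame_list[i] - frame_list[i - 1] > 6]
--     ends = starts[1:] + [n]
--     return [(frame_list[s] // fps, frame_list[e - 1] // fps + 1) for s, e in zip(starts, ends)]
-- ===== Notes on version B (the rewrite author's own statement) =====
-- stated objective: alternative
-- what changed: Replaces A's stateful accumulator loop (start_index bookkeeping plus a for/else trailing emit) by a boundary-index method: filter out the run-start indices, pair each with the next start via zip, and map each index pair directly to its clip tuple.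
import Mathlib
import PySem

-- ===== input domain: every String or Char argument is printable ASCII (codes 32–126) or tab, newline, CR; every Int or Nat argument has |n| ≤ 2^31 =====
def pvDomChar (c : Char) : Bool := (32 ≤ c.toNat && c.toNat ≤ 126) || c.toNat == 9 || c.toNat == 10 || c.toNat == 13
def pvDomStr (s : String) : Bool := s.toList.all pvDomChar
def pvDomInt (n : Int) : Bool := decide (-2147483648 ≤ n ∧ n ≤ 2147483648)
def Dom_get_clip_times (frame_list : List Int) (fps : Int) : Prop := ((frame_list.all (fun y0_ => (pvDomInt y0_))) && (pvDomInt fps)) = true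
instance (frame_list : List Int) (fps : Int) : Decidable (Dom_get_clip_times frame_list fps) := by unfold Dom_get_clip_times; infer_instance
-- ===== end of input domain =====

-- B replaces A's stateful accumulator loop (start_index + for/else trailing emit) by a
-- boundary-index method: filter run-start indices, zip with the next starts, map to clips;
-- objective: alternative (same O(n) cost, stateless decomposition).


-- ===== PORT A =====
-- the for-loop over range(1, len) with state (start_index, clips); the base case is the
-- for/else trailing emit.  Indices i, i-1, start_index are provably in range on Pre_,
-- so pyGetD is exact there.
def loopA_get_clip_times (f : List Int) (fps : Int) (i start : Nat) (clips : List (Int × Int)) : List (Int × Int) :=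
  if _h : i < f.length then
    if PySem.List.pyGetD f (i : Int) 0 - PySem.List.pyGetD f ((i : Int) - 1) 0 > 6 then
      loopA_get_clip_times f fps (i + 1) i
        (clips ++ [(PySem.Int.floordiv (PySem.List.pyGetD f (start : Int) 0) fps,
                    PySem.Int.floordiv (PySem.List.pyGetD f ((i : Int) - 1) 0) fps + 1)])
    else
      loopA_get_clip_times f fps (i + 1) start clips
  else
    clips ++ [(PySem.Int.floordiv (PySem.List.pyGetD f (start : Int) 0) fps,
               PySem.Int.floordiv (PySem.List.pyGetD f ((f.length : Int) - 1) 0) fps + 1)]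
termination_by f.length - i

def get_clip_times (frame_list : List Int) (fps : Int) : List (Int × Int) :=
  loopA_get_clip_times frame_list fps 1 0 []

-- ===== PORT B =====
-- Source B: starts = filtered run-start indices, ends = starts[1:] + [n], then map the zip.
def get_clip_times_alt (frame_list : List Int) (fps : Int) : List (Int × Int) :=
  let n := frame_list.length
  let starts := (List.range n).filter (fun (i : Nat) =>
    i == 0 || decide (PySem.List.pyGetD frame_list ((i : Nat) : Int) 0
                      - PySem.List.pyGetD frame_list (((i : Nat) : Int) - 1) 0 > 6))
  let ends := starts.drop 1 ++ [n]
  (starts.zip ends).map (fun p =>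
    (PySem.Int.floordiv (PySem.List.pyGetD frame_list (p.1 : Int) 0) fps,
     PySem.Int.floordiv (PySem.List.pyGetD frame_list ((p.2 : Int) - 1) 0) fps + 1))

-- ===== PRECONDITION & SPEC =====
-- A raises IndexError on frame_list = [] and ZeroDivisionError on fps = 0; both excluded.
def Pre_get_clip_times (frame_list : List Int) (fps : Int) : Prop :=
  frame_list ≠ [] ∧ fps ≠ 0
instance (frame_list : List Int) (fps : Int) : Decidable (Pre_get_clip_times frame_list fps) := by
  unfold Pre_get_clip_times; infer_instance
def pvWitness_get_clip_times : List Int × Int := ([3, 5, 40, 44], 24)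

def Spec_get_clip_times (frame_list : List Int) (fps : Int) (out : List (Int × Int)) : Prop := out = get_clip_times_alt frame_list fps
instance (frame_list : List Int) (fps : Int) (out : List (Int × Int)) : Decidable (Spec_get_clip_times frame_list fps out) := by unfold Spec_get_clip_times; infer_instance

-- ===== CLAIM (what is proved, stated in full; the proofs are below) =====
def Claim_equal_get_clip_times : Prop := ∀ (frame_list : List Int) (fps : Int), Dom_get_clip_times frame_list fps → Pre_get_clip_times frame_list fps → Spec_get_clip_times frame_list fps (get_clip_times frame_list fps)

-- ===== LEMMAS AND PROOFS =====

-- proof-side: the break indices from position i on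
def breaks_get_clip_times (f : List Int) (i : Nat) : List Nat :=
  (List.range' i (f.length - i)).filter
    (fun j => decide (PySem.List.pyGetD f (j : Int) 0 - PySem.List.pyGetD f ((j : Int) - 1) 0 > 6))

-- proof-side: B's zip-and-map transform applied to an arbitrary list of start indices
def mkClips_get_clip_times (f : List Int) (fps : Int) (starts : List Nat) : List (Int × Int) :=
  (starts.zip (starts.drop 1 ++ [f.length])).map (fun p =>
    (PySem.Int.floordiv (PySem.List.pyGetD f (p.1 : Int) 0) fps,
     PySem.Int.floordiv (PySem.List.pyGetD f ((p.2 : Int) - 1) 0) fps + 1))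

lemma mkClips_cons (f : List Int) (fps : Int) (s a : Nat) (rest : List Nat) :
    mkClips_get_clip_times f fps (s :: a :: rest)
      = (PySem.Int.floordiv (PySem.List.pyGetD f (s : Int) 0) fps,
         PySem.Int.floordiv (PySem.List.pyGetD f ((a : Int) - 1) 0) fps + 1)
        :: mkClips_get_clip_times f fps (a :: rest) := by
  simp [mkClips_get_clip_times]

lemma breaks_eq_nil (f : List Int) : breaks_get_clip_times f f.length = [] := by
  simp [breaks_get_clip_times]

lemma breaks_step (f : List Int) (i : Nat) (h : i < f.length) :
    breaks_get_clip_times f i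
      = if PySem.List.pyGetD f (i : Int) 0 - PySem.List.pyGetD f ((i : Int) - 1) 0 > 6
        then i :: breaks_get_clip_times f (i + 1)
        else breaks_get_clip_times f (i + 1) := by
  unfold breaks_get_clip_times
  rw [show f.length - i = (f.length - (i + 1)) + 1 by omega, List.range'_succ, List.filter_cons]
  by_cases hc : PySem.List.pyGetD f (i : Int) 0 - PySem.List.pyGetD f ((i : Int) - 1) 0 > 6 <;>
    simp [hc]

-- Invariant: A's loop from position i with run start `start` produces the clips obtained by
-- pairing `start :: breaks i` with the following starts.
lemma loopA_eq_mkClips (f : List Int) (fps : Int) :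
    ∀ (k i start : Nat) (clips : List (Int × Int)),
      1 ≤ i → i ≤ f.length → k = f.length - i →
      loopA_get_clip_times f fps i start clips
        = clips ++ mkClips_get_clip_times f fps (start :: breaks_get_clip_times f i) := by
  intro k
  induction k with
  | zero =>
    intro i start clips h1 h2 hk
    have hi : i = f.length := by omega
    subst hi
    rw [loopA_get_clip_times]
    simp [breaks_eq_nil, mkClips_get_clip_times]
  | succ k ih =>
    intro i start clips h1 h2 hk
    have hi : i < f.length := by omega
    rw [loopA_get_clip_times]
    simp only [hi, dite_true]
    rw [breaks_step f i hi]
    by_cases hc : PySem.List.pyGetD f (i : Int) 0 - PySem.List.pyGetD f ((i : Int) - 1) 0 > 6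
    · rw [if_pos hc, if_pos hc,
        ih (i + 1) i _ (by omega) (by omega) (by omega),
        mkClips_cons]
      simp
    · rw [if_neg hc, if_neg hc]
      exact ih (i + 1) start clips (by omega) (by omega) (by omega)

-- B's filtered start list is 0 followed by the break indices from 1 on (for nonempty f).
lemma starts_eq_breaks (f : List Int) (h : f ≠ []) :
    (List.range f.length).filter (fun (i : Nat) =>
        i == 0 || decide (PySem.List.pyGetD f ((i : Nat) : Int) 0
                          - PySem.List.pyGetD f (((i : Nat) : Int) - 1) 0 > 6))
      = 0 :: breaks_get_clip_times f 1 := by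
  have hn : 1 ≤ f.length := by
    cases f with
    | nil => exact absurd rfl h
    | cons a t => simp
  rw [List.range_eq_range',
    show List.range' 0 f.length = List.range' 0 ((f.length - 1) + 1) by rw [show (f.length - 1) + 1 = f.length by omega],
    List.range'_succ, List.filter_cons]
  simp only [beq_self_eq_true, Bool.true_or, if_true]
  unfold breaks_get_clip_times
  simp only [List.cons.injEq, true_and]
  apply List.filter_congr
  intro j hj
  have h1 : 1 ≤ j := by
    have := List.mem_range'.mp hj
    omega
  simp [Nat.ne_of_gt h1]

-- ===== VERDICT (by name: the statement is the Claim_ definition above) =====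
theorem get_clip_times_spec : Claim_equal_get_clip_times := by
  intro f fps _hdom hpre
  obtain ⟨hne, _⟩ := hpre
  have hn : 1 ≤ f.length := by
    cases f with
    | nil => exact absurd rfl hne
    | cons a t => simp
  unfold Spec_get_clip_times get_clip_times
  simp only [get_clip_times_alt]
  rw [starts_eq_breaks f hne,
    loopA_eq_mkClips f fps (f.length - 1) 1 0 [] (by omega) hn (by omega)]
  simp [mkClips_get_clip_times]
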